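-- pv_equiv track=rewrite | github.com/LiisMarie/Programming-Exercises | HackerRank/summing-pieces/Solution.py | summingPieces
-- ===== SOURCE A (Python) =====
-- def summingPieces(integer_array):
--     mod = 10 ** 9 + 7
--     total_value = q = t = 0
--     t_2 = z = 1
--
--     for integer in integer_array:
--         total_value = (2 * total_value + t_2 * integer + q) % mod
--         q = (q + z * integer) % mod
--         t = 1 if t == 0 else (t * 2) % mod
--         z = (z + t) % mod
--         t_2 = (t_2 + z) % mod
--     return total_value
-- ===== SOURCE B (Python) =====
-- def summingPieces(integer_array):
--     mod = 10 ** 9 + 7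
--     n = len(integer_array)
--     total = 0
--     for i, a in enumerate(integer_array, 1):
--         c = (pow(2, n, mod) + pow(2, n - 1, mod) - pow(2, n - i, mod) - pow(2, i - 1, mod)) % mod
--         total = (total + a * c) % mod
--     return total
-- ===== Notes on version B (the rewrite author's own statement) =====
-- stated objective: simpler
-- what changed: Replaces A's five coupled doubling recurrences with a direct per-element closed-form coefficient 2^n + 2^(n-1) - 2^(n-i) - 2^(i-1) (mod 1e9+7) summed in one plain loop.
import Mathlib
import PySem

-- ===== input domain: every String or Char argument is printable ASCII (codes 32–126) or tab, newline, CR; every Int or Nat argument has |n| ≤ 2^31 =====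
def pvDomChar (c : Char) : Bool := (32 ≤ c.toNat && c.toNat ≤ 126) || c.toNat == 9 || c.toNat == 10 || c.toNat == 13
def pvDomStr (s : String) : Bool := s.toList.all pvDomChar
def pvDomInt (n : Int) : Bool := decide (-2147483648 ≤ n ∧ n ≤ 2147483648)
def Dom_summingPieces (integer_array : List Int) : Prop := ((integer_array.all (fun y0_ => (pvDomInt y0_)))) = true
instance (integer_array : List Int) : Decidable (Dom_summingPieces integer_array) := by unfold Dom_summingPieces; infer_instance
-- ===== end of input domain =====

-- B replaces A's five coupled doubling recurrences with a closed-form per-element coefficient; objective: simpler.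

-- ===== PORT A =====
-- the loop body of A, on state (total_value, q, t, t_2, z)
def pvStepA (mod : Int) (st : Int × Int × Int × Int × Int) (integer : Int) :
    Int × Int × Int × Int × Int :=
  let total_value := PySem.Int.mod (2 * st.1 + st.2.2.2.1 * integer + st.2.1) mod
  let q := PySem.Int.mod (st.2.1 + st.2.2.2.2 * integer) mod
  let t := if st.2.2.1 = 0 then 1 else PySem.Int.mod (st.2.2.1 * 2) mod
  let z := PySem.Int.mod (st.2.2.2.2 + t) mod
  let t_2 := PySem.Int.mod (st.2.2.2.1 + z) mod
  (total_value, q, t, t_2, z)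

def summingPieces (integer_array : List Int) : Int :=
  let mod : Int := 10 ^ 9 + 7
  (integer_array.foldl (pvStepA mod) (0, 0, 0, 1, 1)).1

-- ===== PORT B =====
-- the loop body of B: add a * c_i where c_i is the closed-form coefficient
-- (the index ia.1 ranges over 1..n, so ia.1.toNat and the Nat subtractions are exact)
def pvStepB (mod : Int) (n : Nat) (total : Int) (ia : Int × Int) : Int :=
  let c := PySem.Int.mod
    (PySem.Int.powMod 2 n mod + PySem.Int.powMod 2 (n - 1) mod -
     PySem.Int.powMod 2 (n - ia.1.toNat) mod - PySem.Int.powMod 2 (ia.1.toNat - 1) mod) mod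
  PySem.Int.mod (total + ia.2 * c) mod

def summingPieces_alt (integer_array : List Int) : Int :=
  let mod : Int := 10 ^ 9 + 7
  let n := integer_array.length
  (PySem.List.enumerate integer_array 1).foldl (pvStepB mod n) 0

-- ===== PRECONDITION & SPEC =====
def Spec_summingPieces (integer_array : List Int) (out : Int) : Prop := out = summingPieces_alt integer_array
instance (integer_array : List Int) (out : Int) : Decidable (Spec_summingPieces integer_array out) := by unfold Spec_summingPieces; infer_instance

-- ===== CLAIM (what is proved, stated in full; the proofs are below) =====
def Claim_equal_summingPieces : Prop := ∀ (integer_array : List Int), Dom_summingPieces integer_array → Spec_summingPieces integer_array (summingPieces integer_array)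

-- ===== LEMMAS AND PROOFS =====

-- the exact (unreduced) value of A's q after a prefix: sum of x_i * 2^(i-1)
def pvQ : List Int → Int
  | [] => 0
  | x :: xs => x + 2 * pvQ xs

-- the exact closed-form coefficient of the element at 1-based position i in a list of length n
def pvC (n i : Nat) : Int := 2 ^ n + 2 ^ (n - 1) - 2 ^ (n - i) - 2 ^ (i - 1)

-- the exact (unreduced) coefficient sum, positions starting at i
def pvS (n : Nat) : Nat → List Int → Int
  | _, [] => 0
  | i, x :: xs => x * pvC n i + pvS n (i + 1) xs

theorem pvmod_eq (a : Int) : PySem.Int.mod a (10 ^ 9 + 7) = a % (10 ^ 9 + 7) := by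
  show Int.fmod a _ = _
  rw [Int.fmod_eq_emod]
  norm_num

theorem pvpow_eq (e : Nat) : PySem.Int.powMod 2 e (10 ^ 9 + 7) = (2 : Int) ^ e % (10 ^ 9 + 7) := by
  show PySem.Int.mod _ _ = _
  rw [pvmod_eq]

theorem pvbase (a : Int) : Int.ModEq (10 ^ 9 + 7) (a % (10 ^ 9 + 7)) a :=
  Int.emod_emod_of_dvd a dvd_rfl

theorem two_pow_mod_ne_zero (j : Nat) : ((2 : Int) ^ j) % (10 ^ 9 + 7) ≠ 0 := by
  intro h
  have hdvd : ((10 : Int) ^ 9 + 7) ∣ 2 ^ j := Int.dvd_of_emod_eq_zero h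
  have hdvd' : (1000000007 : Nat) ∣ 2 ^ j := by
    have : ((1000000007 : Nat) : Int) ∣ ((2 ^ j : Nat) : Int) := by push_cast; norm_num at hdvd ⊢; exact hdvd
    exact_mod_cast this
  obtain ⟨k, _, hk⟩ := (Nat.dvd_prime_pow Nat.prime_two).mp hdvd'
  cases k with
  | zero => simp at hk
  | succ k' =>
    have h2 : (2 : Nat) ∣ 2 ^ (k' + 1) := Dvd.intro (2 ^ k') (by ring)
    rw [← hk] at h2
    omega

theorem pvmm (a : Int) :
    Int.ModEq (10 ^ 9 + 7) ((a % (10 ^ 9 + 7)) * 2) (a * 2) :=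
  (pvbase a).mul_right 2

theorem pvQ_append (xs : List Int) (x : Int) :
    pvQ (xs ++ [x]) = pvQ xs + 2 ^ xs.length * x := by
  induction xs with
  | nil => simp [pvQ]
  | cons y ys ih =>
    simp only [List.cons_append, pvQ, ih, List.length_cons, pow_succ]
    ring

theorem pvS_append (n : Nat) (xs : List Int) (x : Int) :
    ∀ i, pvS n i (xs ++ [x]) = pvS n i xs + x * pvC n (i + xs.length) := by
  induction xs with
  | nil => intro i; simp [pvS]
  | cons y ys ih =>
    intro i
    simp only [List.cons_append, pvS, ih (i + 1), List.length_cons]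
    rw [show i + (ys.length + 1) = i + 1 + ys.length by omega]
    ring

theorem pvC_step (n i : Nat) (h1 : 1 ≤ i) (h2 : i ≤ n) :
    pvC (n + 1) i = 2 * pvC n i + 2 ^ (i - 1) := by
  obtain ⟨j, rfl⟩ : ∃ j, i = j + 1 := ⟨i - 1, by omega⟩
  obtain ⟨d, rfl⟩ : ∃ d, n = j + 1 + d := ⟨n - (j + 1), by omega⟩
  simp only [pvC]
  rw [show j + 1 + d + 1 - 1 = j + d + 1 by omega,
    show j + 1 + d + 1 - (j + 1) = d + 1 by omega,
    show j + 1 - 1 = j by omega,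
    show j + 1 + d - 1 = j + d by omega,
    show j + 1 + d - (j + 1) = d by omega,
    show j + 1 + d + 1 = j + d + 2 by omega,
    show j + 1 + d = j + d + 1 by omega]
  ring

theorem pvS_shift (n : Nat) (xs : List Int) :
    ∀ i, 1 ≤ i → i + xs.length ≤ n + 1 →
      pvS (n + 1) i xs = 2 * pvS n i xs + 2 ^ (i - 1) * pvQ xs := by
  induction xs with
  | nil => intro i _ _; simp [pvS, pvQ]
  | cons y ys ih =>
    intro i h1 h2
    simp only [pvS, pvQ, List.length_cons] at *
    rw [ih (i + 1) (by omega) (by omega), pvC_step n i h1 (by omega),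
      show i + 1 - 1 = (i - 1) + 1 by omega, pow_succ]
    ring

theorem pvS_concat (xs : List Int) (x : Int) :
    pvS (xs.length + 1) 1 (xs ++ [x]) =
      2 * pvS xs.length 1 xs + pvQ xs + (2 ^ (xs.length + 1) - 1) * x := by
  rw [pvS_append (xs.length + 1) xs x 1,
    pvS_shift xs.length xs 1 (by omega) (by omega)]
  have hlast : pvC (xs.length + 1) (1 + xs.length) = 2 ^ (xs.length + 1) - 1 := by
    simp only [pvC, show 1 + xs.length = xs.length + 1 by omega, Nat.sub_self,
      Nat.add_sub_cancel, pow_zero]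
    ring
  rw [hlast]
  ring

-- characterization of A's fold state after a prefix
theorem foldA_char (xs : List Int) :
    xs.foldl (pvStepA (10 ^ 9 + 7)) (0, 0, 0, 1, 1) =
      (pvS xs.length 1 xs % (10 ^ 9 + 7),
       pvQ xs % (10 ^ 9 + 7),
       (if xs.length = 0 then 0 else (2 : Int) ^ (xs.length - 1) % (10 ^ 9 + 7)),
       ((2 : Int) ^ (xs.length + 1) - 1) % (10 ^ 9 + 7),
       (2 : Int) ^ xs.length % (10 ^ 9 + 7)) := by
  induction xs using List.reverseRecOn with
  | nil => norm_num [pvS, pvQ]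
  | append_singleton ys x ih =>
    rw [List.foldl_append, ih, List.foldl_cons, List.foldl_nil]
    simp only [List.length_append, List.length_cons, List.length_nil, Nat.zero_add]
    cases hn : ys.length with
    | zero =>
      have hys : ys = [] := List.length_eq_zero_iff.mp hn
      subst hys
      simp only [List.nil_append, Nat.zero_add]
      simp only [pvStepA, pvmod_eq, pvS, pvQ, pvC, Prod.mk.injEq]
      norm_num
    | succ k =>
      have hc := pvS_concat ys x
      have hq := pvQ_append ys x
      rw [hn] at hc hq
      simp only [pvStepA, pvmod_eq, Prod.mk.injEq,
        if_neg (Nat.succ_ne_zero k), if_neg (Nat.succ_ne_zero (k + 1)),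
        Nat.succ_sub_one, if_neg (two_pow_mod_ne_zero k)]
      refine ⟨?_, ?_, ?_, ?_, ?_⟩
      · -- total_value
        calc (2 * (pvS (k + 1) 1 ys % (10 ^ 9 + 7)) + ((2 : Int) ^ (k + 1 + 1) - 1) % (10 ^ 9 + 7) * x
                + pvQ ys % (10 ^ 9 + 7)) % (10 ^ 9 + 7)
            = (2 * pvS (k + 1) 1 ys + ((2 : Int) ^ (k + 1 + 1) - 1) * x + pvQ ys) % (10 ^ 9 + 7) :=
              (((pvbase _).mul_left 2).add ((pvbase _).mul_right x)).add (pvbase _)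
          _ = pvS (k + 1 + 1) 1 (ys ++ [x]) % (10 ^ 9 + 7) := by rw [hc]; ring_nf
      · -- q
        calc (pvQ ys % (10 ^ 9 + 7) + (2 : Int) ^ (k + 1) % (10 ^ 9 + 7) * x) % (10 ^ 9 + 7)
            = (pvQ ys + (2 : Int) ^ (k + 1) * x) % (10 ^ 9 + 7) :=
              (pvbase _).add ((pvbase _).mul_right x)
          _ = pvQ (ys ++ [x]) % (10 ^ 9 + 7) := by rw [hq]
      · -- t
        calc ((2 : Int) ^ k % (10 ^ 9 + 7)) * 2 % (10 ^ 9 + 7)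
            = (2 : Int) ^ k * 2 % (10 ^ 9 + 7) := pvmm _
          _ = (2 : Int) ^ (k + 1) % (10 ^ 9 + 7) := by rw [pow_succ 2 k]
      · -- t_2
        have hz : ((2 : Int) ^ (k + 1) % (10 ^ 9 + 7) + ((2 : Int) ^ k % (10 ^ 9 + 7)) * 2 % (10 ^ 9 + 7)) % (10 ^ 9 + 7)
            = (2 : Int) ^ (k + 1 + 1) % (10 ^ 9 + 7) := by
          calc ((2 : Int) ^ (k + 1) % (10 ^ 9 + 7) + ((2 : Int) ^ k % (10 ^ 9 + 7)) * 2 % (10 ^ 9 + 7)) % (10 ^ 9 + 7)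
              = ((2 : Int) ^ (k + 1) + (2 : Int) ^ k * 2) % (10 ^ 9 + 7) := (pvbase _).add ((pvbase _).trans (pvmm _))
            _ = (2 : Int) ^ (k + 1 + 1) % (10 ^ 9 + 7) := by
                congr 1
                rw [pow_succ 2 (k + 1), pow_succ 2 k]
                ring
        rw [hz]
        calc (((2 : Int) ^ (k + 1 + 1) - 1) % (10 ^ 9 + 7) + (2 : Int) ^ (k + 1 + 1) % (10 ^ 9 + 7)) % (10 ^ 9 + 7)
            = (((2 : Int) ^ (k + 1 + 1) - 1) + (2 : Int) ^ (k + 1 + 1)) % (10 ^ 9 + 7) :=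
              (pvbase _).add (pvbase _)
          _ = ((2 : Int) ^ (k + 1 + 1 + 1) - 1) % (10 ^ 9 + 7) := by
              congr 1
              rw [pow_succ 2 (k + 1 + 1)]
              ring
      · -- z
        calc ((2 : Int) ^ (k + 1) % (10 ^ 9 + 7) + ((2 : Int) ^ k % (10 ^ 9 + 7)) * 2 % (10 ^ 9 + 7)) % (10 ^ 9 + 7)
            = ((2 : Int) ^ (k + 1) + (2 : Int) ^ k * 2) % (10 ^ 9 + 7) := (pvbase _).add ((pvbase _).trans (pvmm _))
          _ = (2 : Int) ^ (k + 1 + 1) % (10 ^ 9 + 7) := by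
              congr 1
              rw [pow_succ 2 (k + 1), pow_succ 2 k]
              ring

-- characterization of B's fold
theorem foldB_char (n : Nat) (l : List Int) :
    ∀ (i : Nat) (a : Int), 1 ≤ i → i + l.length ≤ n + 1 →
      (PySem.List.enumerate l (i : Int)).foldl (pvStepB (10 ^ 9 + 7) n) (a % (10 ^ 9 + 7)) =
        (a + pvS n i l) % (10 ^ 9 + 7) := by
  induction l with
  | nil => intro i a _ _; simp [pvS, PySem.List.enumerate_nil]
  | cons x xs ih =>
    intro i a h1 h2
    rw [PySem.List.enumerate_cons, List.foldl_cons]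
    have hstep : pvStepB (10 ^ 9 + 7) n (a % (10 ^ 9 + 7)) ((i : Int), x)
        = (a + x * pvC n i) % (10 ^ 9 + 7) := by
      simp only [pvStepB, pvmod_eq, pvpow_eq, Int.toNat_natCast]
      have hcmix : Int.ModEq (10 ^ 9 + 7)
          (((2 : Int) ^ n % (10 ^ 9 + 7) + (2 : Int) ^ (n - 1) % (10 ^ 9 + 7)
            - (2 : Int) ^ (n - i) % (10 ^ 9 + 7) - (2 : Int) ^ (i - 1) % (10 ^ 9 + 7)) % (10 ^ 9 + 7))
          (pvC n i) :=
        (pvbase _).trans ((((pvbase _).add (pvbase _)).sub (pvbase _)).sub (pvbase _))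
      exact (pvbase a).add (hcmix.mul_left x)
    rw [hstep]
    have hcast : ((i : Int) + 1) = ((i + 1 : Nat) : Int) := by push_cast; ring
    rw [hcast, ih (i + 1) (a + x * pvC n i) (by omega) (by simp at h2 ⊢; omega)]
    simp only [pvS]
    ring_nf

-- ===== VERDICT (by name: the statement is the Claim_ definition above) =====
theorem summingPieces_spec : Claim_equal_summingPieces := by
  intro xs _
  show (List.foldl (pvStepA (10 ^ 9 + 7)) (0, 0, 0, 1, 1) xs).1
      = List.foldl (pvStepB (10 ^ 9 + 7) xs.length) 0 (PySem.List.enumerate xs 1)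
  have hb := foldB_char xs.length xs 1 0 (by omega) (by omega)
  rw [Int.zero_emod, Nat.cast_one] at hb
  rw [foldA_char xs, hb]
  simp
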